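-- pv_equiv track=rewrite | github.com/aausen/code_challenges | cal_review.py | is_first_come_first_served
-- ===== SOURCE A (Python) =====
-- def is_first_come_first_served(take_out_orders, dine_in_orders, served_orders):
--     take_out_index = 0
--     dine_in_index = 0
--     take_out_max_index = len(take_out_orders) - 1
--     dine_in_max_index = len(dine_in_orders) -1
--
--     for order in served_orders:
--         if take_out_index <= take_out_max_index and order == take_out_orders[take_out_index]:
--             take_out_index += 1
--
--         elif dine_in_index <= dine_in_max_index and order == dine_in_orders[dine_in_index]:
--             dine_in_index += 1
--         else:
--             return False
--     if dine_in_index != len(dine_in_orders) or take_out_index != len(take_out_orders):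
--         return False
--     return True
-- ===== SOURCE B (Python) =====
-- def is_first_come_first_served(take_out_orders, dine_in_orders, served_orders):
--     # Phase 1: greedily delete take_out_orders, as a subsequence, from served_orders.
--     stack = take_out_orders[::-1]
--     leftover = []
--     for order in served_orders:
--         if stack and stack[-1] == order:
--             stack.pop()
--         else:
--             leftover.append(order)
--     # Phase 2: the take-out queue must be used up and the leftover must be exactly dine-in.
--     return not stack and leftover == dine_in_orders
-- ===== Notes on version B (the rewrite author's own statement) =====
-- stated objective: alternative
-- what changed: Replaces A's single-pass two-pointer priority merge with a two-phase algorithm: first greedily delete take_out_orders as a subsequence from served_orders (dine_in_orders is never consulted in the loop), then check the leftover list equals dine_in_orders exactly.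
import Mathlib
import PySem

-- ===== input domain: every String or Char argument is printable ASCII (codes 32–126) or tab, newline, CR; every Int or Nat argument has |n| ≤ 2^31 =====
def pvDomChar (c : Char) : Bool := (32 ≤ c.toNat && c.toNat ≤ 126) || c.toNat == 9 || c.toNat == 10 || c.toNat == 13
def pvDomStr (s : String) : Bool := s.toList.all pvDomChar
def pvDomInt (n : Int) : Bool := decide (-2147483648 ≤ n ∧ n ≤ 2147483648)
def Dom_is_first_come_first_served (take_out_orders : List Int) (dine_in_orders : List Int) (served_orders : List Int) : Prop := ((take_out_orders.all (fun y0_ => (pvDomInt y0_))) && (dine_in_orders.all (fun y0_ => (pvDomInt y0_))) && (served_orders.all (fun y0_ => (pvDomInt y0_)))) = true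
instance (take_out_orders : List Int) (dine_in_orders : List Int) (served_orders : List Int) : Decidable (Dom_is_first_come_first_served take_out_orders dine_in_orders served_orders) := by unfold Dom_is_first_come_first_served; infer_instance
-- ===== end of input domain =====

-- B replaces A's two-pointer priority merge by two phases: greedily delete take_out_orders
-- as a subsequence from served_orders, then compare the leftover with dine_in_orders;
-- objective: alternative (same cost, different algorithm).

-- ===== PORT A =====
-- A's for-loop with early return, carried as a recursion over served_orders with the
-- two integer indices as state; the final index-vs-length test is A's closing 'if'.
def pvA_loop (take_out_orders dine_in_orders : List Int) (take_out_index dine_in_index : Int) : List Int → Bool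
  | [] =>
      if dine_in_index ≠ (dine_in_orders.length : Int) ∨ take_out_index ≠ (take_out_orders.length : Int) then false else true
  | order :: rest =>
      if take_out_index ≤ (take_out_orders.length : Int) - 1 ∧
          PySem.List.pyGet? take_out_orders take_out_index = some order then
        pvA_loop take_out_orders dine_in_orders (take_out_index + 1) dine_in_index rest
      else if dine_in_index ≤ (dine_in_orders.length : Int) - 1 ∧
          PySem.List.pyGet? dine_in_orders dine_in_index = some order then
        pvA_loop take_out_orders dine_in_orders take_out_index (dine_in_index + 1) rest
      else false

def is_first_come_first_served (take_out_orders : List Int) (dine_in_orders : List Int) (served_orders : List Int) : Bool :=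
  pvA_loop take_out_orders dine_in_orders 0 0 served_orders

-- ===== PORT B =====
-- Source B's stack is take_out_orders[::-1] popped from the END, i.e. the first unmatched
-- take-out order is on top; it is modelled here as the list of remaining take-out orders
-- with the top at the HEAD (stack[-1] = head, stack.pop() = tail).  The for-loop that
-- builds 'leftover' is this recursion over served_orders with state (stack, leftover).
def pvB_loop (stack leftover : List Int) : List Int → List Int × List Int
  | [] => (stack, leftover)
  | order :: rest =>
      match stack with
      | top :: more =>
          if top = order then pvB_loop more leftover rest
          else pvB_loop stack (leftover ++ [order]) rest
      | [] => pvB_loop [] (leftover ++ [order]) rest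

def is_first_come_first_served_alt (take_out_orders : List Int) (dine_in_orders : List Int) (served_orders : List Int) : Bool :=
  let res := pvB_loop take_out_orders [] served_orders
  res.1.isEmpty && res.2 == dine_in_orders

-- ===== PRECONDITION & SPEC =====
def Spec_is_first_come_first_served (take_out_orders : List Int) (dine_in_orders : List Int) (served_orders : List Int) (out : Bool) : Prop := out = is_first_come_first_served_alt take_out_orders dine_in_orders served_orders
instance (take_out_orders : List Int) (dine_in_orders : List Int) (served_orders : List Int) (out : Bool) : Decidable (Spec_is_first_come_first_served take_out_orders dine_in_orders served_orders out) := by unfold Spec_is_first_come_first_served; infer_instance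

-- ===== CLAIM (what is proved, stated in full; the proofs are below) =====
def Claim_equal_is_first_come_first_served : Prop := ∀ (take_out_orders : List Int) (dine_in_orders : List Int) (served_orders : List Int), Dom_is_first_come_first_served take_out_orders dine_in_orders served_orders → Spec_is_first_come_first_served take_out_orders dine_in_orders served_orders (is_first_come_first_served take_out_orders dine_in_orders served_orders)

-- ===== LEMMAS AND PROOFS =====

-- the accumulator of pvB_loop only ever grows on the right
lemma pvB_loop_acc (served : List Int) :
    ∀ (stack acc : List Int),
      pvB_loop stack acc served =
        ((pvB_loop stack [] served).1, acc ++ (pvB_loop stack [] served).2) := by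
  induction served with
  | nil => intro stack acc; simp [pvB_loop]
  | cons o rest ih =>
      intro stack acc
      match stack with
      | [] =>
          simp only [pvB_loop]
          rw [ih [] (acc ++ [o]), ih [] ([] ++ [o])]
          simp
      | top :: more =>
          simp only [pvB_loop]
          by_cases h : top = o
          · simp only [if_pos h]
            exact ih more acc
          · simp only [if_neg h]
            rw [ih (top :: more) (acc ++ [o]), ih (top :: more) ([] ++ [o])]
            simp

-- A's loop from indices (n, m) equals B's phase-1 on the remaining take-out suffix
-- followed by B's phase-2 comparison with the remaining dine-in suffix.
lemma pvA_loop_eq_B (served : List Int) :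
    ∀ (tos dis : List Int) (n m : ℕ), n ≤ tos.length → m ≤ dis.length →
      pvA_loop tos dis (n : Int) (m : Int) served =
        ((pvB_loop (tos.drop n) [] served).1.isEmpty &&
          (pvB_loop (tos.drop n) [] served).2 == dis.drop m) := by
  induction served with
  | nil =>
      intro tos dis n m hn hm
      simp only [pvA_loop, pvB_loop]
      by_cases h1 : n = tos.length <;> by_cases h2 : m = dis.length <;>
        simp [h1, h2, List.drop_eq_nil_iff, (List.drop_eq_nil_iff).not] <;> omega
  | cons o rest ih =>
      intro tos dis n m hn hm
      have hheadto : (tos.drop n).head? = tos[n]? := by simp [List.head?_drop]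
      simp only [pvA_loop]
      rw [PySem.List.pyGet?_natCast tos n, PySem.List.pyGet?_natCast dis m]
      by_cases hA : tos[n]? = some o
      · -- take-out branch: both consume the take-out head
        have hlt : n < tos.length := by
          by_contra h
          simp [List.getElem?_eq_none (by omega : tos.length ≤ n)] at hA
        rw [if_pos (⟨by omega, hA⟩ : ((n : Int) ≤ (tos.length : Int) - 1 ∧ tos[n]? = some o))]
        have hdrop : tos.drop n = o :: tos.drop (n + 1) := by
          rw [List.drop_eq_getElem_cons hlt]
          simp [List.getElem?_eq_getElem hlt] at hA
          simp [hA]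
        rw [show ((n : Int) + 1) = ((n + 1 : ℕ) : Int) by push_cast; ring, hdrop]
        simp only [pvB_loop, if_pos]
        exact ih tos dis (n + 1) m (by omega) hm
      · -- no take-out match: B appends o to the leftover, A compares with the dine-in head
        rw [if_neg (fun h => hA h.2)]
        have hstep : pvB_loop (tos.drop n) [] (o :: rest) =
            ((pvB_loop (tos.drop n) [] rest).1,
              o :: (pvB_loop (tos.drop n) [] rest).2) := by
          match hd : tos.drop n with
          | [] => simp only [pvB_loop]; rw [pvB_loop_acc]; simp
          | top :: more =>
              have : top ≠ o := by
                intro h; apply hA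
                rw [← hheadto, hd, h]; rfl
              simp only [pvB_loop, if_neg this]
              rw [pvB_loop_acc rest (top :: more) ([] ++ [o])]
              simp
        rw [hstep]
        by_cases hB : dis[m]? = some o
        · have hlt : m < dis.length := by
            by_contra h
            simp [List.getElem?_eq_none (by omega : dis.length ≤ m)] at hB
          rw [if_pos (⟨by omega, hB⟩ : ((m : Int) ≤ (dis.length : Int) - 1 ∧ dis[m]? = some o)),
            show ((m : Int) + 1) = ((m + 1 : ℕ) : Int) by push_cast; ring]
          have hdropd : dis.drop m = o :: dis.drop (m + 1) := by
            rw [List.drop_eq_getElem_cons hlt]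
            simp [List.getElem?_eq_getElem hlt] at hB
            simp [hB]
          rw [ih tos dis n (m + 1) hn (by omega), hdropd]
          simp
        · rw [if_neg (fun h => hB h.2)]
          -- A returns false; B's comparison fails since o is not the dine-in head
          symm
          simp only [Bool.and_eq_false_iff, beq_eq_false_iff_ne, ne_eq]
          right
          intro hcons
          apply hB
          rw [← List.head?_drop, ← hcons]
          rfl

-- ===== VERDICT (by name: the statement is the Claim_ definition above) =====
theorem is_first_come_first_served_spec : Claim_equal_is_first_come_first_served := by
  intro tos dis served _
  unfold Spec_is_first_come_first_served is_first_come_first_served is_first_come_first_served_alt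
  have := pvA_loop_eq_B served tos dis 0 0 (Nat.zero_le _) (Nat.zero_le _)
  simpa using this
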